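-- pv_equiv track=rewrite | github.com/hivehelsinki/remote-challs | chall06/ohakola.py | shelves_needed
-- ===== SOURCE A (Python) =====
-- def shelves_needed(books, shelves, shelf_index, book_index):
-- 	count = 1
-- 	curr_shelf = shelves[shelf_index]
-- 	books_len = len(books)
-- 	shelves_len = len(shelves)
-- 	books_placed = 0
-- 	while books_placed < books_len:
-- 		if curr_shelf >= books[book_index]:
-- 			curr_shelf = curr_shelf - books[book_index]
-- 			book_index += 1
-- 			if book_index >= books_len:
-- 				book_index = 0
-- 			books_placed += 1
-- 		else:
-- 			count += 1
-- 			if count > shelves_len: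
-- 				return -1
-- 			shelf_index += 1
-- 			if shelf_index >= shelves_len:
-- 				shelf_index = 0
-- 			curr_shelf = shelves[shelf_index]
-- 	return count
-- ===== SOURCE B (Python) =====
-- def shelves_needed(books, shelves, shelf_index, book_index):
--     m = len(shelves)
--     n = len(books)
--     si = range(m)[shelf_index]      # validate and normalize the starting shelf index
--     if n == 0:
--         return 1
--     bi = range(n)[book_index]       # validate and normalize the starting book index
--     queue = books[bi:] + books[:bi]
--     prefix = [0]
--     for x in queue:
--         prefix.append(prefix[-1] + x)
--     order = shelves[si:] + shelves[:si]
--     p = 0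
--     for count, cap in enumerate(order, 1):
--         t = cap + prefix[p]
--         while p < n and prefix[p + 1] <= t:
--             p += 1
--         if p == n:
--             return count
--     return -1
-- ===== Notes on version B (the rewrite author's own statement) =====
-- stated objective: alternative
-- what changed: B precomputes a prefix-sum array of the rotated book queue and, for each shelf in rotated order, advances a single pointer by comparing absolute prefix sums against a per-shelf threshold (cap + prefix[p]), replacing A's mutable running-capacity subtraction and increment-then-wrap index pointers.
import Mathlib
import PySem

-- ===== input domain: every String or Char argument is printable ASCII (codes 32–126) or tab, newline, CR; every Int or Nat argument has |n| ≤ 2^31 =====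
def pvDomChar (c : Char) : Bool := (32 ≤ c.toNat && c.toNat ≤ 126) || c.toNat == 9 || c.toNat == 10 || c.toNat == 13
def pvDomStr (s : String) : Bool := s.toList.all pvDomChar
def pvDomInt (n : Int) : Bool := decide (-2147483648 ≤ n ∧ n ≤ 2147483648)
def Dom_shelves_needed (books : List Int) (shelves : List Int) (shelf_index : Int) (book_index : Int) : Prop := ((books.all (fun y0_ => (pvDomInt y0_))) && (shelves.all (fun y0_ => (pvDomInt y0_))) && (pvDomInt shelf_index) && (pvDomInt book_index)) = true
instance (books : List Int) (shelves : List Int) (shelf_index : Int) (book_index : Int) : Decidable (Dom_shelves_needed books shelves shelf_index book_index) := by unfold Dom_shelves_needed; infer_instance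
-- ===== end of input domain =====

-- B replaces A's running-capacity simulation with precomputed prefix sums of the rotated book
-- queue: each shelf advances a pointer by comparing absolute prefix sums to a per-shelf
-- threshold; same cost, different algorithmic state (objective: alternative).

-- ===== PORT A =====
-- the while loop of A; fuel only makes the recursion structural (books.length + shelves.length + 1
-- always suffices, proved in the lemmas); none = an IndexError inside the loop
def shelvesALoop (books shelves : List Int) (books_len shelves_len : Int)
    (count curr_shelf shelf_index book_index books_placed : Int) : Nat → Option Int
  | 0 => none
  | fuel + 1 =>
    if books_placed < books_len then
      match PySem.List.pyGet? books book_index with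
      | none => none
      | some bk =>
        if bk ≤ curr_shelf then
          let bi' : Int := book_index + 1
          let bi'' : Int := if books_len ≤ bi' then 0 else bi'
          shelvesALoop books shelves books_len shelves_len count (curr_shelf - bk) shelf_index bi'' (books_placed + 1) fuel
        else
          let count' : Int := count + 1
          if shelves_len < count' then some (-1)
          else
            let si' : Int := shelf_index + 1
            let si'' : Int := if shelves_len ≤ si' then 0 else si'
            match PySem.List.pyGet? shelves si'' with
            | none => none
            | some s => shelvesALoop books shelves books_len shelves_len count' s si'' book_index books_placed fuel
    else some count

def shelves_needed (books : List Int) (shelves : List Int) (shelf_index : Int) (book_index : Int) : Int :=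
  (match PySem.List.pyGet? shelves shelf_index with
   | none => none   -- IndexError on shelves[shelf_index]
   | some curr =>
       shelvesALoop books shelves (books.length : Int) (shelves.length : Int)
         1 curr shelf_index book_index 0 (books.length + shelves.length + 1)).getD 0

-- ===== PORT B =====
-- the inner `while p < n and prefix[p + 1] <= t: p += 1` of Source B; p only grows, bounded by n.
-- prefix has length n+1 and 0 ≤ p ≤ n throughout, so Python's prefix[p+1] never raises; getD is
-- exact here (the equivalence proof shows the reads are in range).
def bAdvance (pfx : List Int) (n : Nat) (t : Int) : Nat → Nat → Nat
  | p, 0 => p   -- unreachable: the fuel n - p + 1 always suffices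
  | p, fuel + 1 =>
    if p < n then
      if pfx.getD (p + 1) 0 ≤ t then bAdvance pfx n t (p + 1) fuel else p
    else p

-- the `for count, cap in enumerate(order, 1)` loop of Source B; falls off the end → return -1
def bOuter (pfx : List Int) (n : Nat) : List Int → Int → Nat → Int
  | [], _, _ => -1
  | cap :: rest, count, p =>
    let t := cap + pfx.getD p 0
    let p' := bAdvance pfx n t p (n - p + 1)
    if p' = n then count else bOuter pfx n rest (count + 1) p'

-- the `prefix = [0]; for x in queue: prefix.append(prefix[-1] + x)` of Source B, built head-first
def buildPrefix (xs : List Int) (last : Int) : List Int :=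
  match xs with
  | [] => [last]
  | x :: rest => last :: buildPrefix rest (last + x)

def shelves_needed_alt (books : List Int) (shelves : List Int) (shelf_index : Int) (book_index : Int) : Int :=
  -- `range(m)[shelf_index]` validates a (possibly negative) index; none = IndexError (outside Pre_)
  match PySem.List.pyGet? (PySem.List.pyRange 0 (shelves.length : Int) 1) shelf_index with
  | none => 0
  | some si =>
    if books.length = 0 then 1
    else
      match PySem.List.pyGet? (PySem.List.pyRange 0 (books.length : Int) 1) book_index with
      | none => 0
      | some bi =>
        let queue := PySem.List.slice books (some bi) none ++ PySem.List.slice books none (some bi)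
        let pfx := buildPrefix queue 0
        let order := PySem.List.slice shelves (some si) none ++ PySem.List.slice shelves none (some si)
        bOuter pfx books.length order 1 0

-- ===== PRECONDITION & SPEC =====
-- Pre_ = exactly the inputs where A raises no IndexError: shelves[shelf_index] must exist, and
-- books[book_index] is only read when books is non-empty.
def Pre_shelves_needed (books : List Int) (shelves : List Int) (shelf_index : Int) (book_index : Int) : Prop :=
  PySem.Raise.InRange shelves.length shelf_index ∧ (books = [] ∨ PySem.Raise.InRange books.length book_index)
instance (books : List Int) (shelves : List Int) (shelf_index : Int) (book_index : Int) : Decidable (Pre_shelves_needed books shelves shelf_index book_index) := by unfold Pre_shelves_needed; infer_instance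

def pvWitness_shelves_needed : List Int × List Int × Int × Int := ([2, 1, 3], [3, 1, 4], -2, 1)


def Spec_shelves_needed (books : List Int) (shelves : List Int) (shelf_index : Int) (book_index : Int) (out : Int) : Prop := out = shelves_needed_alt books shelves shelf_index book_index
instance (books : List Int) (shelves : List Int) (shelf_index : Int) (book_index : Int) (out : Int) : Decidable (Spec_shelves_needed books shelves shelf_index book_index out) := by unfold Spec_shelves_needed; infer_instance

-- ===== CLAIM (what is proved, stated in full; the proofs are below) =====
def Claim_equal_shelves_needed : Prop := ∀ (books : List Int) (shelves : List Int) (shelf_index : Int) (book_index : Int), Dom_shelves_needed books shelves shelf_index book_index → Pre_shelves_needed books shelves shelf_index book_index → Spec_shelves_needed books shelves shelf_index book_index (shelves_needed books shelves shelf_index book_index)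

-- ===== LEMMAS AND PROOFS =====

-- a valid Python index i into l reads l[(i % len).toNat]
lemma pyGet_emod {l : List Int} {i : Int} (h1 : -(l.length : Int) ≤ i) (h2 : i < (l.length : Int)) :
    PySem.List.pyGet? l i = l[(i % (l.length : Int)).toNat]? := by
  rcases le_or_gt 0 i with hi | hi
  · rw [PySem.List.pyGet?_of_nonneg l hi]
    congr 1
    have : i % (l.length : Int) = i := Int.emod_eq_of_lt hi h2
    rw [this]
  · have hlen : 0 < l.length := by omega
    have hk0 : 0 < (-i).toNat := by omega
    have hkl : (-i).toNat ≤ l.length := by omega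
    have hi' : i = -((-i).toNat : Int) := by omega
    rw [hi', PySem.List.pyGet?_neg_natCast l _ hk0 hkl]
    congr 1
    have hmod : -((-i).toNat : Int) % (l.length : Int) = -((-i).toNat : Int) + l.length := by
      have h1 : (-((-i).toNat : Int) + l.length) % (l.length : Int) = -((-i).toNat : Int) % (l.length : Int) := by
        rw [show -((-i).toNat : Int) + l.length = -((-i).toNat : Int) + (l.length : Int) * 1 by ring, Int.add_mul_emod_self_left]
      rw [← h1, Int.emod_eq_of_lt (by omega) (by omega)]
    rw [hmod]
    omega

lemma pyGet?_eq_some_getD {l : List Int} {i : Int} (h : PySem.Raise.InRange l.length i) :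
    PySem.List.pyGet? l i = some (PySem.List.pyGetD l i 0) := by
  cases hg : PySem.List.pyGet? l i with
  | none => exact absurd ((PySem.List.pyGet?_eq_none_iff l i).mp hg) (not_not_intro h)
  | some v => simp [PySem.List.pyGetD, hg]

-- a rotation by r read at a valid index j is the original read at (r + j) % len
lemma rot_get? {l : List Int} {r j : Int} (hr0 : 0 ≤ r) (hr1 : r < (l.length : Int))
    (hj0 : 0 ≤ j) (hj1 : j < (l.length : Int)) :
    (l.drop r.toNat ++ l.take r.toNat)[j.toNat]? = l[((r + j) % (l.length : Int)).toNat]? := by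
  by_cases hlt : j.toNat < (l.drop r.toNat).length
  · rw [List.getElem?_append_left hlt, List.getElem?_drop]
    congr 1
    have : (r + j) % (l.length : Int) = r + j := Int.emod_eq_of_lt (by omega) (by simp at hlt; omega)
    rw [this]; omega
  · rw [List.getElem?_append_right (by omega)]
    simp only [List.length_drop] at hlt
    have hsub : j.toNat - (l.drop r.toNat).length < r.toNat := by simp [List.length_drop]; omega
    rw [List.getElem?_take_of_lt hsub]
    congr 1
    have : (r + j) % (l.length : Int) = r + j - l.length := by
      have h1 : (r + j - l.length + l.length) % (l.length : Int) = (r + j - l.length) % (l.length : Int) := by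
        rw [show r + j - l.length + l.length = r + j - (l.length : Int) + (l.length : Int) * 1 by ring, Int.add_mul_emod_self_left]
      have h2 : (r + j - l.length) % (l.length : Int) = r + j - l.length := by
        apply Int.emod_eq_of_lt
        · omega
        · omega
      calc (r + j) % (l.length : Int) = (r + j - l.length + l.length) % (l.length : Int) := by ring_nf
        _ = r + j - l.length := by rw [h1, h2]
    rw [this]
    simp only [List.length_drop]
    omega

lemma rot_length (l : List Int) (r : Nat) (h : r ≤ l.length) :
    (l.drop r ++ l.take r).length = l.length := by
  simp; omega

-- `range(m)[i]` for a valid (possibly negative) index i is the normalized index i % m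
lemma pyGet_range_emod {m i : Int} (hm : 0 < m) (h1 : -m ≤ i) (h2 : i < m) :
    PySem.List.pyGet? (PySem.List.pyRange 0 m 1) i = some (i % m) := by
  have hlen : ((PySem.List.pyRange 0 m 1).length : Int) = m := by
    rw [PySem.List.length_pyRange_one]; omega
  rw [pyGet_emod (by omega) (by omega), hlen]
  have hmod0 : 0 ≤ i % m := Int.emod_nonneg i (by omega)
  have hmod1 : i % m < m := Int.emod_lt_of_pos i hm
  have hidx : (i % m).toNat < (PySem.List.pyRange 0 m 1).length := by omega
  rw [List.getElem?_eq_getElem hidx, PySem.List.getElem_pyRange_one]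
  congr 1
  omega

-- buildPrefix read at j ≤ len is the running sum
lemma buildPrefix_getD : ∀ (xs : List Int) (a : Int) (j : Nat), j ≤ xs.length →
    (buildPrefix xs a).getD j 0 = a + (xs.take j).sum := by
  intro xs
  induction xs with
  | nil =>
    intro a j hj
    have hj0 : j = 0 := by simpa using hj
    subst hj0; simp [buildPrefix]
  | cons x rest ih =>
    intro a j hj
    cases j with
    | zero => simp [buildPrefix]
    | succ j =>
      simp only [buildPrefix, List.getD_cons_succ, List.take_succ_cons, List.sum_cons]
      rw [ih (a + x) j (by simpa using hj)]
      ring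

-- B's state after bAdvance, mid-shelf: the continuation B runs from pointer p on shelf `count`
-- with threshold t and the remaining shelves `rest`
def bMid (pfx : List Int) (n : Nat) (t : Int) (p : Nat) (count : Int) (rest : List Int) : Int :=
  if bAdvance pfx n t p (n - p + 1) = n then count
  else bOuter pfx n rest (count + 1) (bAdvance pfx n t p (n - p + 1))

lemma bOuter_cons (pfx : List Int) (n : Nat) (cap : Int) (rest : List Int) (count : Int) (p : Nat) :
    bOuter pfx n (cap :: rest) count p = bMid pfx n (cap + pfx.getD p 0) p count rest := rfl

lemma bAdvance_step {pfx : List Int} {n : Nat} {t : Int} {p : Nat}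
    (hpn : p < n) (hle : pfx.getD (p + 1) 0 ≤ t) :
    bAdvance pfx n t p (n - p + 1) = bAdvance pfx n t (p + 1) (n - (p + 1) + 1) := by
  conv_lhs => rw [bAdvance]
  rw [if_pos hpn, if_pos hle]
  congr 1
  omega

lemma bAdvance_stop {pfx : List Int} {n : Nat} {t : Int} {p : Nat}
    (h : ¬ (p < n ∧ pfx.getD (p + 1) 0 ≤ t)) :
    bAdvance pfx n t p (n - p + 1) = p := by
  rw [bAdvance]
  split_ifs with h1 h2
  · exact absurd ⟨h1, h2⟩ h
  · rfl
  · rfl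

-- the simulation: A's loop from a coherent intermediate state equals B's mid-shelf continuation
lemma simLoop (books shelves : List Int)
    (b0 s0 : Int) (hb00 : 0 ≤ b0) (hb01 : b0 < (books.length : Int))
    (hs00 : 0 ≤ s0) (hs01 : s0 < (shelves.length : Int))
    (queue order pfx : List Int)
    (hq : queue = books.drop b0.toNat ++ books.take b0.toNat)
    (ho : order = shelves.drop s0.toNat ++ shelves.take s0.toNat)
    (hpfx : pfx = buildPrefix queue 0) :
    ∀ (fuel : Nat) (count curr bi si : Int) (p : Nat),
    p ≤ books.length →
    -(books.length : Int) ≤ bi → bi < (books.length : Int) →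
    bi % (books.length : Int) = (b0 + (p : Int)) % (books.length : Int) →
    -(shelves.length : Int) ≤ si → si < (shelves.length : Int) →
    1 ≤ count → count ≤ (shelves.length : Int) →
    si % (shelves.length : Int) = (s0 + (count - 1)) % (shelves.length : Int) →
    (books.length - p) + ((shelves.length : Int) - count).toNat + 1 ≤ fuel →
    shelvesALoop books shelves (books.length : Int) (shelves.length : Int)
        count curr si bi (p : Int) fuel
      = some (bMid pfx books.length (curr + pfx.getD p 0) p count (order.drop count.toNat)) := by
  intro fuel
  have hqlen : queue.length = books.length := by rw [hq]; exact rot_length books b0.toNat (by omega)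
  have holen : order.length = shelves.length := by rw [ho]; exact rot_length shelves s0.toNat (by omega)
  induction fuel with
  | zero => intro count curr bi si p _ _ _ _ _ _ _ _ _ hfuel; omega
  | succ fuel ih =>
    intro count curr bi si p hp hb1 hb2 hbmod hs1 hs2 hc1 hc2 hsmod hfuel
    by_cases hpn : p < books.length
    · -- loop body runs
      have hInR : PySem.Raise.InRange books.length bi := ⟨by omega, by omega⟩
      have hbk : PySem.List.pyGet? books bi = queue[p]? := by
        rw [pyGet_emod hb1 hb2, hbmod, hq]
        have hr := rot_get? (l := books) hb00 hb01 (j := (p : Int)) (by omega) (by exact_mod_cast hpn)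
        rw [show ((p : Int)).toNat = p by omega] at hr
        exact hr.symm
      have hplt : p < queue.length := by omega
      have hbkval : PySem.List.pyGet? books bi = some (queue[p]) :=
        hbk.trans (List.getElem?_eq_getElem hplt)
      -- prefix step: pfx[p+1] = pfx[p] + queue[p]
      have hstep : pfx.getD (p + 1) 0 = pfx.getD p 0 + queue[p] := by
        rw [hpfx, buildPrefix_getD queue 0 (p + 1) (by omega), buildPrefix_getD queue 0 p (by omega)]
        rw [List.take_add_one, List.sum_append, List.getElem?_eq_getElem hplt]
        simp
      simp only [shelvesALoop]
      rw [if_pos (by exact_mod_cast hpn), hbkval]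
      dsimp only
      by_cases hfit : queue[p] ≤ curr
      · -- book fits: B's bAdvance takes one step
        rw [if_pos hfit]
        have hcast : (p : Int) + 1 = ((p + 1 : Nat) : Int) := by push_cast; ring
        rw [hcast]
        have hrec := ih count (curr - queue[p])
          (if (books.length : Int) ≤ bi + 1 then 0 else bi + 1) si (p + 1)
          (by omega) (by split <;> omega) (by split <;> omega)
          (by
            have hstep1 : (b0 + (p : Int) + 1) % (books.length : Int)
                = (bi + 1) % (books.length : Int) := (Int.ModEq.add_right 1 hbmod).symm
            split
            · have he : bi + 1 = (books.length : Int) := by omega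
              push_cast
              rw [show b0 + ((p : Int) + 1) = b0 + (p : Int) + 1 by ring, hstep1, he,
                Int.emod_self, Int.zero_emod]
            · push_cast
              rw [show b0 + ((p : Int) + 1) = b0 + (p : Int) + 1 by ring, hstep1])
          hs1 hs2 hc1 hc2 hsmod (by omega)
        rw [hrec]
        congr 1
        have ht : curr - queue[p] + pfx.getD (p + 1) 0 = curr + pfx.getD p 0 := by
          rw [hstep]; ring
        rw [ht]
        unfold bMid
        rw [bAdvance_step hpn (by rw [hstep]; omega)]
      · -- book does not fit: bAdvance stops at p
        rw [if_neg hfit]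
        have hadv : bAdvance pfx books.length (curr + pfx.getD p 0) p (books.length - p + 1) = p :=
          bAdvance_stop (by rw [hstep]; omega)
        by_cases hover : (shelves.length : Int) < count + 1
        · rw [if_pos hover]
          unfold bMid
          rw [hadv, if_neg (by omega)]
          have hcm : count.toNat = order.length := by omega
          rw [show order.drop count.toNat = [] by rw [hcm, List.drop_length]]
          rfl
        · rw [if_neg hover]
          have hsiR : PySem.Raise.InRange shelves.length
              (if (shelves.length : Int) ≤ si + 1 then (0 : Int) else si + 1) := by
            constructor <;> split <;> omega
          have hpgs := pyGet?_eq_some_getD hsiR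
          rw [hpgs]
          dsimp only
          set si'' : Int := if (shelves.length : Int) ≤ si + 1 then (0 : Int) else si + 1 with hsi''
          have hmodsi : si'' % (shelves.length : Int) = (s0 + count) % (shelves.length : Int) := by
            have e1 : si'' % (shelves.length : Int) = (si + 1) % (shelves.length : Int) := by
              rw [hsi'']
              split
              · have : si + 1 = (shelves.length : Int) := by omega
                rw [this, Int.emod_self, Int.zero_emod]
              · rfl
            have e2 : (si + 1) % (shelves.length : Int) = (s0 + (count - 1) + 1) % (shelves.length : Int) :=
              Int.ModEq.add_right 1 hsmod
            rw [e1, e2]; ring_nf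
          -- the shelf A reads is order[count]
          have hcnt : count.toNat < order.length := by omega
          have hsval : PySem.List.pyGetD shelves si'' 0 = order[count.toNat] := by
            have h1 : PySem.List.pyGet? shelves si'' = some (PySem.List.pyGetD shelves si'' 0) := hpgs
            have h2 : PySem.List.pyGet? shelves si'' = order[count.toNat]? := by
              rw [pyGet_emod (by omega) (by omega), hmodsi, ho]
              have h0 : (count.toNat : Int) = count := by omega
              rw [← h0, ← rot_get? hs00 hs01 (by omega) (by omega)]
            rw [h2, List.getElem?_eq_getElem hcnt] at h1
            exact (Option.some.injEq _ _ ▸ h1).symm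
          have hrec := ih (count + 1) (PySem.List.pyGetD shelves si'' 0) bi si'' p
            hp hb1 hb2 hbmod (by rw [hsi'']; split <;> omega) (by rw [hsi'']; split <;> omega)
            (by omega) (by omega)
            (by rw [hmodsi]; ring_nf) (by omega)
          rw [hrec]
          congr 1
          conv_rhs => rw [bMid]
          rw [hadv, if_neg (show ¬ p = books.length by omega)]
          have hdrop : order.drop count.toNat = order[count.toNat] :: order.drop (count.toNat + 1) :=
            List.drop_eq_getElem_cons hcnt
          rw [hdrop, bOuter_cons, hsval]
          congr 2
          omega
    · -- books all placed: both return count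
      have hpe : p = books.length := by omega
      simp only [shelvesALoop]
      rw [if_neg (by exact_mod_cast (by omega : ¬ (p : Int) < (books.length : Int)))]
      unfold bMid
      rw [bAdvance_stop (by omega), if_pos hpe]

-- ===== VERDICT (by name: the statement is the Claim_ definition above) =====
theorem shelves_needed_spec : Claim_equal_shelves_needed := by
  intro books shelves si0 bi0 _ hpre
  obtain ⟨⟨hsl, hsr⟩, hb⟩ := hpre
  have hm0 : 0 < shelves.length := by omega
  have hm0' : (0 : Int) < (shelves.length : Int) := by exact_mod_cast hm0
  have hpg0 : PySem.List.pyGet? shelves si0 = some (PySem.List.pyGetD shelves si0 0) :=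
    pyGet?_eq_some_getD ⟨hsl, hsr⟩
  show shelves_needed books shelves si0 bi0 = shelves_needed_alt books shelves si0 bi0
  simp only [shelves_needed, shelves_needed_alt, hpg0]
  rw [pyGet_range_emod hm0' hsl hsr]
  dsimp only
  have hs0nn : 0 ≤ si0 % (shelves.length : Int) := Int.emod_nonneg si0 (by omega)
  have hs0lt : si0 % (shelves.length : Int) < (shelves.length : Int) := Int.emod_lt_of_pos si0 hm0'
  have hsd := PySem.List.slice_from shelves hs0nn
  have hst := PySem.List.slice_to shelves hs0nn
  rcases hb with hbe | ⟨hbl, hbr⟩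
  · -- books = []: A's loop runs zero iterations, B returns 1 directly
    subst hbe
    norm_num [shelvesALoop]
  · have hn0 : 0 < books.length := by omega
    have hn0' : (0 : Int) < (books.length : Int) := by exact_mod_cast hn0
    rw [if_neg (by omega : ¬ books.length = 0)]
    rw [pyGet_range_emod hn0' hbl hbr]
    dsimp only
    have hbnn : 0 ≤ bi0 % (books.length : Int) := Int.emod_nonneg bi0 (by omega)
    have hblt : bi0 % (books.length : Int) < (books.length : Int) := Int.emod_lt_of_pos bi0 hn0'
    have hbd := PySem.List.slice_from books hbnn
    have hbt := PySem.List.slice_to books hbnn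
    rw [hsd, hst, hbd, hbt]
    set b0 : Int := bi0 % (books.length : Int) with hb0def
    set s0 : Int := si0 % (shelves.length : Int) with hs0def
    set queue : List Int := books.drop b0.toNat ++ books.take b0.toNat with hqdef
    set order : List Int := shelves.drop s0.toNat ++ shelves.take s0.toNat with hodef
    set pfx : List Int := buildPrefix queue 0 with hpfxdef
    have holen : order.length = shelves.length := by
      rw [hodef]; exact rot_length shelves s0.toNat (by omega)
    have hsim := simLoop books shelves b0 s0 hbnn hblt hs0nn hs0lt
      queue order pfx hqdef hodef hpfxdef
      (books.length + shelves.length + 1) 1 (PySem.List.pyGetD shelves si0 0) bi0 si0 0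
      (by omega) hbl hbr
      (by rw [hb0def]; push_cast; rw [add_zero]; exact (Int.emod_emod_of_dvd bi0 dvd_rfl).symm)
      hsl hsr le_rfl (by omega)
      (by rw [hs0def]; norm_num)
      (by omega)
    rw [show ((0 : Nat) : Int) = (0 : Int) by rfl] at hsim
    rw [hsim]
    -- B's actual call is bOuter on the full order starting at shelf 1, pointer 0
    have hcnt0 : (0 : Nat) < order.length := by omega
    have hdrop0 : order = order[0] :: order.drop 1 := by
      have h := List.drop_eq_getElem_cons (l := order) hcnt0
      simpa using h
    have hcurr : PySem.List.pyGetD shelves si0 0 = order[0] := by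
      have h2 : PySem.List.pyGet? shelves si0 = order[0]? := by
        rw [pyGet_emod hsl hsr]
        have hr := rot_get? (l := shelves) (r := s0) (j := 0) hs0nn hs0lt le_rfl hm0'
        simp only [Int.toNat_zero, add_zero] at hr
        rw [show s0 % (shelves.length : Int) = s0 from Int.emod_emod_of_dvd si0 dvd_rfl] at hr
        exact hr.symm
      rw [h2, List.getElem?_eq_getElem hcnt0] at hpg0
      exact (Option.some.injEq _ _ ▸ hpg0).symm
    conv_rhs => rw [hdrop0, bOuter_cons]
    rw [hcurr]
    simp only [Option.getD_some, Int.toNat_one]
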